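-- pv_equiv track=rewrite | github.com/Shiva224096/V4 | scripts/patterns.py | get_pattern_label
-- ===== SOURCE A (Python) =====
-- PATTERN_ICONS = {
--     # Bullish
--     "hammer":           "🔨 Hammer",
--     "inverted_hammer":  "🔁 Inverted Hammer",
--     "bullish_engulfing":"🟢 Bullish Engulfing",
--     "morning_star":     "⭐ Morning Star",
--     "bullish_marubozu": "📊 Bullish Marubozu",
--     "piercing_line":    "🔪 Piercing Line",
--     "bullish_harami":   "🤝 Bullish Harami",
--     "three_white":      "🏳️ Three White Soldiers",
--     "tweezer_bottom":   "🔧 Tweezer Bottom",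
--     "dragonfly_doji":   "🐉 Dragonfly Doji",
--     # Bearish
--     "shooting_star":    "🌠 Shooting Star",
--     "evening_star":     "🌇 Evening Star",
--     "bearish_engulfing":"🔴 Bearish Engulfing",
--     "dark_cloud":       "☁️ Dark Cloud Cover",
--     "hanging_man":      "🪢 Hanging Man",
--     "three_black":      "⬛ Three Black Crows",
-- }
--
-- BULLISH_PATTERNS = {
--     "hammer", "inverted_hammer", "bullish_engulfing", "morning_star",
--     "bullish_marubozu", "piercing_line", "bullish_harami",
--     "three_white", "tweezer_bottom", "dragonfly_doji",
-- }
--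
-- def get_pattern_label(patterns: list[str]) -> str:
--     """Return a user-friendly label for the first detected bullish pattern, or first any pattern."""
--     # Prefer bullish patterns first
--     for p in patterns:
--         if p in BULLISH_PATTERNS and p in PATTERN_ICONS:
--             return PATTERN_ICONS[p]
--     # Then any pattern
--     for p in patterns:
--         if p in PATTERN_ICONS:
--             return PATTERN_ICONS[p]
--     return "—"
-- ===== SOURCE B (Python) =====
-- PATTERN_ICONS = {
--     "hammer":           "🔨 Hammer",
--     "inverted_hammer":  "🔁 Inverted Hammer",
--     "bullish_engulfing":"🟢 Bullish Engulfing",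
--     "morning_star":     "⭐ Morning Star",
--     "bullish_marubozu": "📊 Bullish Marubozu",
--     "piercing_line":    "🔪 Piercing Line",
--     "bullish_harami":   "🤝 Bullish Harami",
--     "three_white":      "🏳️ Three White Soldiers",
--     "tweezer_bottom":   "🔧 Tweezer Bottom",
--     "dragonfly_doji":   "🐉 Dragonfly Doji",
--     "shooting_star":    "🌠 Shooting Star",
--     "evening_star":     "🌇 Evening Star",
--     "bearish_engulfing":"🔴 Bearish Engulfing",
--     "dark_cloud":       "☁️ Dark Cloud Cover",
--     "hanging_man":      "🪢 Hanging Man",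
--     "three_black":      "⬛ Three Black Crows",
-- }
--
-- BULLISH_PATTERNS = {
--     "hammer", "inverted_hammer", "bullish_engulfing", "morning_star",
--     "bullish_marubozu", "piercing_line", "bullish_harami",
--     "three_white", "tweezer_bottom", "dragonfly_doji",
-- }
--
-- def get_pattern_label(patterns: list[str]) -> str:
--     """Single pass: return the first bullish icon immediately, remembering the
--     first known icon as a fallback."""
--     fallback = None
--     for p in patterns:
--         icon = PATTERN_ICONS.get(p)
--         if icon is not None:
--             if p in BULLISH_PATTERNS:
--                 return icon
--             if fallback is None:
--                 fallback = icon
--     return fallback if fallback is not None else "—"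
-- ===== Notes on version B (the rewrite author's own statement) =====
-- stated objective: alternative
-- what changed: A scans the list twice (first for a bullish icon, then for any icon); B makes one pass that returns the first bullish icon immediately while carrying the first known icon as a fallback.
import Mathlib
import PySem

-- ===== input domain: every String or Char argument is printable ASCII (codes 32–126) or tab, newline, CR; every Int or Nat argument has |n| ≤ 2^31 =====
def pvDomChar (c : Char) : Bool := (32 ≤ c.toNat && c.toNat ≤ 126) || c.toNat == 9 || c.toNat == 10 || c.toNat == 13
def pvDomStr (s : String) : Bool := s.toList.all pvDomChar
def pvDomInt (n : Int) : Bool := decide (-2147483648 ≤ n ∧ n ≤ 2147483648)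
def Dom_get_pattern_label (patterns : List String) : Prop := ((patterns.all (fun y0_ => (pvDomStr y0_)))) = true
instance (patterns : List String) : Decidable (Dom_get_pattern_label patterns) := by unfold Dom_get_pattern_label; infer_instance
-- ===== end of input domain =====

-- B folds A's two sequential scans into one pass that returns on the first bullish
-- icon and remembers the first known icon as a fallback (objective: alternative).

def PATTERN_ICONS : PySem.Dict String String := PySem.Dict.ofList [
  ("hammer",            "🔨 Hammer"),
  ("inverted_hammer",   "🔁 Inverted Hammer"),
  ("bullish_engulfing", "🟢 Bullish Engulfing"),
  ("morning_star",      "⭐ Morning Star"),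
  ("bullish_marubozu",  "📊 Bullish Marubozu"),
  ("piercing_line",     "🔪 Piercing Line"),
  ("bullish_harami",    "🤝 Bullish Harami"),
  ("three_white",       "🏳️ Three White Soldiers"),
  ("tweezer_bottom",    "🔧 Tweezer Bottom"),
  ("dragonfly_doji",    "🐉 Dragonfly Doji"),
  ("shooting_star",     "🌠 Shooting Star"),
  ("evening_star",      "🌇 Evening Star"),
  ("bearish_engulfing", "🔴 Bearish Engulfing"),
  ("dark_cloud",        "☁️ Dark Cloud Cover"),
  ("hanging_man",       "🪢 Hanging Man"),
  ("three_black",       "⬛ Three Black Crows")]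

def BULLISH_PATTERNS : PySem.Set String := PySem.Set.ofList [
  "hammer", "inverted_hammer", "bullish_engulfing", "morning_star",
  "bullish_marubozu", "piercing_line", "bullish_harami",
  "three_white", "tweezer_bottom", "dragonfly_doji"]

-- ===== PORT A =====
-- first loop: first p that is bullish and has an icon
def pvLoopBull : List String → Option String
  | [] => none
  | p :: rest =>
    if PySem.Set.contains BULLISH_PATTERNS p && PySem.Dict.contains PATTERN_ICONS p then
      PySem.Dict.get? PATTERN_ICONS p
    else pvLoopBull rest

-- second loop: first p that has an icon
def pvLoopAny : List String → Option String
  | [] => none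
  | p :: rest =>
    if PySem.Dict.contains PATTERN_ICONS p then PySem.Dict.get? PATTERN_ICONS p
    else pvLoopAny rest

def get_pattern_label (patterns : List String) : String :=
  match pvLoopBull patterns with
  | some v => v
  | none =>
    match pvLoopAny patterns with
    | some v => v
    | none => "—"

-- ===== PORT B =====
-- single pass carrying the fallback (first known, non-bullish-preferred, icon)
def pvLoopB : List String → Option String → String
  | [], fb => match fb with | some v => v | none => "—"
  | p :: rest, fb =>
    match PySem.Dict.get? PATTERN_ICONS p with
    | some icon =>
      if PySem.Set.contains BULLISH_PATTERNS p then icon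
      else pvLoopB rest (match fb with | none => some icon | some _ => fb)
    | none => pvLoopB rest fb

def get_pattern_label_alt (patterns : List String) : String :=
  pvLoopB patterns none

-- ===== PRECONDITION & SPEC =====
def Spec_get_pattern_label (patterns : List String) (out : String) : Prop := out = get_pattern_label_alt patterns
instance (patterns : List String) (out : String) : Decidable (Spec_get_pattern_label patterns out) := by unfold Spec_get_pattern_label; infer_instance

-- ===== CLAIM (what is proved, stated in full; the proofs are below) =====
def Claim_equal_get_pattern_label : Prop := ∀ (patterns : List String), Dom_get_pattern_label patterns → Spec_get_pattern_label patterns (get_pattern_label patterns)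

-- ===== LEMMAS AND PROOFS =====

-- Every pattern with an icon that is bullish-and-listed agrees: if the dict lookup
-- succeeds then the A-side guard `bullish && contains` equals `bullish`.
theorem pv_contains_of_get?_some (p icon : String)
    (h : PySem.Dict.get? PATTERN_ICONS p = some icon) :
    PySem.Dict.contains PATTERN_ICONS p = true := by
  rw [PySem.Dict.contains_eq_isSome_get?, h]; rfl

-- B's loop, with an arbitrary fallback, equals A's two-scan result with the
-- fallback spliced between the bullish scan and the any scan.
theorem pvLoopB_eq (ps : List String) (fb : Option String) :
    pvLoopB ps fb =
      match pvLoopBull ps with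
      | some v => v
      | none =>
        match fb with
        | some v => v
        | none => match pvLoopAny ps with
                  | some v => v
                  | none => "—" := by
  induction ps generalizing fb with
  | nil => cases fb <;> simp [pvLoopB, pvLoopBull, pvLoopAny]
  | cons p rest ih =>
    simp only [pvLoopB, pvLoopBull, pvLoopAny]
    cases hg : PySem.Dict.get? PATTERN_ICONS p with
    | none =>
      have hc : PySem.Dict.contains PATTERN_ICONS p = false := by
        rw [PySem.Dict.contains_eq_isSome_get?, hg]; rfl
      simp [hc, ih]
    | some icon =>
      have hc := pv_contains_of_get?_some p icon hg
      by_cases hb : p ∈ BULLISH_PATTERNS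
      · simp [hb, hc]
      · cases fb <;> simp [hb, hc, ih]

-- ===== VERDICT (by name: the statement is the Claim_ definition above) =====
theorem get_pattern_label_spec : Claim_equal_get_pattern_label := by
  intro patterns _
  unfold Spec_get_pattern_label get_pattern_label get_pattern_label_alt
  rw [pvLoopB_eq]
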